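-- pv_equiv track=rewrite | github.com/tomica28/PSZT-snowplow | snowplow.py | get_weight_orderd_goe_list
-- ===== SOURCE A (Python) =====
-- def get_weight_orderd_goe_list(goe_dict):
--     max_nodes = len(list(goe_dict.keys())[0])
--     weight_orderd_goe_list = list()
--     for i in range(max_nodes, 1, -1):
--         goe_with_the_same_number_of_nodes = {}
--         for key in goe_dict:
--             if len(list(key)) == i:
--                 goe_with_the_same_number_of_nodes[key] = goe_dict[key]
--
--         weight_orderd_goe_list.append(goe_with_the_same_number_of_nodes)
--
--     # sort each dictionary in the list
--     for i in range(len(weight_orderd_goe_list)):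
--         weight_orderd_goe_list[i] = dict(sorted(weight_orderd_goe_list[i].items(), key=lambda kv: kv[1]))
--
--     return weight_orderd_goe_list
-- ===== SOURCE B (Python) =====
-- def get_weight_orderd_goe_list(goe_dict):
--     max_nodes = len(next(iter(goe_dict)))
--     buckets = {}
--     for kv in sorted(goe_dict.items(), key=lambda kv: kv[1]):
--         buckets.setdefault(len(kv[0]), []).append(kv)
--     return [dict(buckets.get(i, [])) for i in range(max_nodes, 1, -1)]
-- ===== Notes on version B (the rewrite author's own statement) =====
-- stated objective: simpler
-- what changed: One global stable sort by value followed by a single grouping pass into length buckets (each bucket value-ordered by insertion) replaces A's per-length full rescans of the dict and a separate sort of every bucket.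
import Mathlib
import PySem

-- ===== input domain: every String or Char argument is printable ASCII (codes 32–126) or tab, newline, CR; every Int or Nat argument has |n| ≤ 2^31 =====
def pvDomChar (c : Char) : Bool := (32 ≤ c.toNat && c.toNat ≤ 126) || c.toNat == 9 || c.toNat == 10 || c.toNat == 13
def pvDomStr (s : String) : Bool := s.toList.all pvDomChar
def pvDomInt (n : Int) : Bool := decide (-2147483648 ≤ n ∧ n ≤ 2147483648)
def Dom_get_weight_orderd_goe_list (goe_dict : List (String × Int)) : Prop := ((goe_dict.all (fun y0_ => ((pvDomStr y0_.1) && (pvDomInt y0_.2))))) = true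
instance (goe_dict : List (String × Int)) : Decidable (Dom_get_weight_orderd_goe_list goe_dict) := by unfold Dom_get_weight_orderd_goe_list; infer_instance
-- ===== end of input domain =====

-- B replaces A's per-length rescans of the dict and per-group sorts by ONE global stable
-- sort by value plus a single grouping pass into length buckets (objective: simpler).

-- ===== PORT A =====
def get_weight_orderd_goe_list (goe_dict : List (String × Int)) : List (List (String × Int)) :=
  -- max_nodes = len(list(goe_dict.keys())[0]); on an empty dict Python raises IndexError (excluded by Pre_)
  match PySem.List.pyGet? (goe_dict.map Prod.fst) 0 with
  | none => []
  | some k0 =>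
    let max_nodes : Int := (PySem.Str.len k0 : Int)
    let wol : List (PySem.Dict String Int) :=
      (PySem.List.pyRange max_nodes 1 (-1)).foldl (fun acc i =>
        let same : PySem.Dict String Int :=
          goe_dict.foldl (fun d kv =>
            if ((PySem.Str.len kv.1 : Int) == i) then
              d.insert kv.1 (((PySem.Dict.mk goe_dict).get? kv.1).getD 0)
            else d) PySem.Dict.empty
        acc ++ [same]) []
    -- for i in range(len(..)): wol[i] = dict(sorted(wol[i].items(), key=lambda kv: kv[1]))
    wol.map (fun d => (PySem.Dict.ofList (PySem.List.sorted d.items (fun kv => kv.2) false)).items)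

-- ===== PORT B =====
def get_weight_orderd_goe_list_alt (goe_dict : List (String × Int)) : List (List (String × Int)) :=
  -- max_nodes = len(next(iter(goe_dict))); on an empty dict Python raises StopIteration (excluded by Pre_)
  match goe_dict.head? with
  | none => []
  | some kv0 =>
    let max_nodes : Int := (PySem.Str.len kv0.1 : Int)
    let buckets : PySem.Dict Int (List (String × Int)) :=
      (PySem.List.sorted goe_dict (fun kv => kv.2) false).foldl
        (fun b kv => b.modify ((PySem.Str.len kv.1 : Int)) [] (· ++ [kv])) PySem.Dict.empty
    (PySem.List.pyRange max_nodes 1 (-1)).map (fun i => (PySem.Dict.ofList (buckets.getD i [])).items)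

-- ===== PRECONDITION & SPEC =====
-- Pre_ excludes the empty input, on which A raises IndexError, and inputs with duplicate
-- keys, which a Python dict cannot hold (the association-list reading of such an input is
-- ambiguous: dict construction keeps the last value per key while assoc-list lookup takes
-- the first match).
def Pre_get_weight_orderd_goe_list (goe_dict : List (String × Int)) : Prop :=
  goe_dict ≠ [] ∧ (goe_dict.map Prod.fst).Nodup
instance (goe_dict : List (String × Int)) : Decidable (Pre_get_weight_orderd_goe_list goe_dict) := by unfold Pre_get_weight_orderd_goe_list; infer_instance

def pvWitness_get_weight_orderd_goe_list : (List (String × Int)) := [("ab", 2), ("abc", 1), ("xy", -1)]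

def Spec_get_weight_orderd_goe_list (goe_dict : List (String × Int)) (out : List (List (String × Int))) : Prop := out = get_weight_orderd_goe_list_alt goe_dict
instance (goe_dict : List (String × Int)) (out : List (List (String × Int))) : Decidable (Spec_get_weight_orderd_goe_list goe_dict out) := by unfold Spec_get_weight_orderd_goe_list; infer_instance

-- ===== CLAIM (what is proved, stated in full; the proofs are below) =====
def Claim_equal_get_weight_orderd_goe_list : Prop := ∀ (goe_dict : List (String × Int)), Dom_get_weight_orderd_goe_list goe_dict → Pre_get_weight_orderd_goe_list goe_dict → Spec_get_weight_orderd_goe_list goe_dict (get_weight_orderd_goe_list goe_dict)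

-- ===== LEMMAS AND PROOFS =====

-- insertBy (by value) preserves value-sortedness of the accumulator
theorem pv_insertBy_pairwise (x : String × Int) (acc : List (String × Int))
    (h : acc.Pairwise (fun a b => a.2 ≤ b.2)) :
    (PySem.List.insertBy (fun a b => decide (a.2 < b.2)) x acc).Pairwise (fun a b => a.2 ≤ b.2) := by
  induction acc with
  | nil => simp [PySem.List.insertBy]
  | cons y t ih =>
    rw [List.pairwise_cons] at h
    by_cases hxy : x.2 < y.2
    · simp only [PySem.List.insertBy, hxy, decide_true, if_true]
      refine List.Pairwise.cons ?_ (List.Pairwise.cons h.1 h.2)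
      intro z hz
      rcases List.mem_cons.mp hz with rfl | hz
      · exact le_of_lt hxy
      · exact le_trans (le_of_lt hxy) (h.1 z hz)
    · simp only [PySem.List.insertBy, hxy, decide_false]
      refine List.Pairwise.cons ?_ (ih h.2)
      intro z hz
      rcases (PySem.List.mem_insertBy _ _ _ _).mp hz with rfl | hz
      · exact le_of_not_gt hxy
      · exact h.1 z hz

-- insertBy at the front when x is strictly below everything
theorem pv_insertBy_front (x : String × Int) (l : List (String × Int))
    (h : ∀ z ∈ l, x.2 < z.2) :
    PySem.List.insertBy (fun a b => decide (a.2 < b.2)) x l = x :: l := by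
  cases l with
  | nil => simp [PySem.List.insertBy]
  | cons y t => simp [PySem.List.insertBy, h y (by simp)]

-- filtering commutes with insertBy into a value-sorted accumulator
theorem pv_filter_insertBy (p : String × Int → Bool) (x : String × Int)
    (acc : List (String × Int)) (h : acc.Pairwise (fun a b => a.2 ≤ b.2)) :
    (PySem.List.insertBy (fun a b => decide (a.2 < b.2)) x acc).filter p =
      if p x then PySem.List.insertBy (fun a b => decide (a.2 < b.2)) x (acc.filter p)
      else acc.filter p := by
  induction acc with
  | nil => cases hpx : p x <;> simp [PySem.List.insertBy, hpx]
  | cons y t ih =>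
    rw [List.pairwise_cons] at h
    by_cases hxy : x.2 < y.2
    · simp only [PySem.List.insertBy, hxy, decide_true, if_true]
      have hfront : PySem.List.insertBy (fun a b => decide (a.2 < b.2)) x ((y :: t).filter p)
          = x :: (y :: t).filter p := by
        refine pv_insertBy_front x _ ?_
        intro z hz
        have hz' := List.mem_of_mem_filter hz
        rcases List.mem_cons.mp hz' with rfl | hz'
        · exact hxy
        · exact lt_of_lt_of_le hxy (h.1 z hz')
      cases hpx : p x
      · simp [List.filter_cons, hpx]
      · rw [if_pos rfl, hfront, List.filter_cons, if_pos hpx]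
    · simp only [PySem.List.insertBy, hxy, decide_false]
      cases hpy : p y
      · simpa [List.filter_cons, hpy] using ih h.2
      · have := ih h.2
        cases hpx : p x
        · simp [hpy, hpx] at this ⊢
          simp [this]
        · simp [hpy, hpx] at this ⊢
          simp [this, PySem.List.insertBy, hxy]

-- filtering commutes with the whole insertion-sort fold
theorem pv_filter_foldl_insertBy (p : String × Int → Bool) (xs : List (String × Int)) :
    ∀ acc : List (String × Int), acc.Pairwise (fun a b => a.2 ≤ b.2) →
    ((xs.foldl (fun acc x => PySem.List.insertBy (fun a b => decide (a.2 < b.2)) x acc) acc).filter p) =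
      (xs.filter p).foldl (fun acc x => PySem.List.insertBy (fun a b => decide (a.2 < b.2)) x acc) (acc.filter p) := by
  induction xs with
  | nil => intro acc _; simp
  | cons x t ih =>
    intro acc hacc
    have h1 := ih _ (pv_insertBy_pairwise x acc hacc)
    rw [List.foldl_cons, h1, pv_filter_insertBy p x acc hacc, List.filter_cons]
    cases hpx : p x <;> simp

-- filter of a stable value-sort = stable value-sort of the filter
theorem pv_filter_sorted (p : String × Int → Bool) (xs : List (String × Int)) :
    (PySem.List.sorted xs (fun kv => kv.2) false).filter p =
      PySem.List.sorted (xs.filter p) (fun kv => kv.2) false := by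
  rw [PySem.List.sorted_eq_foldl_insertBy, PySem.List.sorted_eq_foldl_insertBy]
  simpa using pv_filter_foldl_insertBy p xs [] List.Pairwise.nil

-- A's inner per-length collection loop produces exactly the filtered input list
theorem pv_bucket_items (goe_dict : List (String × Int)) (i : Int)
    (hnd : (goe_dict.map Prod.fst).Nodup) :
    (goe_dict.foldl (fun d kv =>
        if ((PySem.Str.len kv.1 : Int) == i) then
          d.insert kv.1 (((PySem.Dict.mk goe_dict).get? kv.1).getD 0)
        else d) PySem.Dict.empty).items =
      goe_dict.filter (fun kv => ((PySem.Str.len kv.1 : Int) == i)) := by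
  rw [← List.foldl_filter]
  rw [PySem.Dict.items_foldl_insert_fresh _ _ _ _ (by intro a _; simp [PySem.Dict.contains_empty])
      ((hnd.sublist (List.Sublist.map Prod.fst List.filter_sublist)))]
  have hlook : ∀ kv ∈ goe_dict, ((PySem.Dict.mk goe_dict).get? kv.1).getD 0 = kv.2 := by
    intro kv hkv
    have : (PySem.Dict.mk goe_dict).get? kv.1 = some kv.2 :=
      PySem.Dict.get?_of_mem_items (PySem.Dict.mk goe_dict) hkv hnd
    simp [this]
  simp only [PySem.Dict.empty, List.nil_append]
  refine List.map_congr_left ?_ |>.trans (List.map_id _)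
  intro kv hkv
  have := hlook kv (List.mem_of_mem_filter hkv)
  simp [this]

-- B's grouping pass: bucket i holds exactly the value-sorted items of length i
theorem pv_getD_buckets (l : List (String × Int)) (i : Int) :
    ((l.foldl (fun b kv => b.modify ((PySem.Str.len kv.1 : Int)) [] (· ++ [kv]))
        (PySem.Dict.empty : PySem.Dict Int (List (String × Int)))).getD i []) =
      l.filter (fun kv => ((PySem.Str.len kv.1 : Int) == i)) := by
  have h := PySem.Dict.getD_foldl_modify_append
      (l.map (fun kv => (((PySem.Str.len kv.1 : Int)), kv)))
      (PySem.Dict.empty : PySem.Dict Int (List (String × Int))) i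
  rw [List.foldl_map] at h
  simp only [PySem.Dict.getD_empty, List.nil_append] at h
  rw [h, List.filter_map, List.map_map]
  simp [Function.comp_def]

-- ===== VERDICT (by name: the statement is the Claim_ definition above) =====
theorem get_weight_orderd_goe_list_spec : Claim_equal_get_weight_orderd_goe_list := by
  intro goe_dict _hdom hpre
  obtain ⟨hne, hnd⟩ := hpre
  obtain ⟨kv0, rest, rfl⟩ := List.exists_cons_of_ne_nil hne
  unfold Spec_get_weight_orderd_goe_list get_weight_orderd_goe_list get_weight_orderd_goe_list_alt
  simp only [List.map_cons, List.head?_cons]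
  rw [show PySem.List.pyGet? (kv0.1 :: rest.map Prod.fst) 0 = some kv0.1 by
    simp [PySem.List.pyGet?, PySem.List.pyIdx?]]
  simp only [PySem.List.foldl_append_singleton_eq_map, List.nil_append, List.map_map]
  refine List.map_congr_left ?_
  intro i _
  simp only [Function.comp_apply]
  rw [pv_bucket_items _ i hnd, pv_getD_buckets, pv_filter_sorted]
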